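-- pv_equiv track=rewrite | github.com/Jafagervik/TDT4287 | heuristic_alignment.py | homology_search
-- ===== SOURCE A (Python) =====
-- def init_matrix(m: int, n: int):
--     return [[False] * (n) for i in range(m)]
--
-- def homology_search(S: str, D: str) -> list[str]:
--     """
--     Dot plot matrix to figure it out
--     >> input: Gene sequence S and gene sequence database D
--     >> output: All genes g in D that are homologs of S
--     """
--     homologs = []
--
--     m = len(S) + 1
--     n = len(D) + 1
--     dot_plot_matrix = init_matrix(m, n)
--
--     for i in range(1, m):
--         for j in range(1, n):
--             if S[i - 1] == D[j - 1]:
--                 eyeballing(dot_plot_matrix, i, j)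
--     return dot_plot_matrix
--
-- def eyeballing(matrix, i, j):
--     """This could result in lots of noice we're not interested in"""
--     matrix[i][j] = True
-- ===== SOURCE B (Python) =====
-- def homology_search(S: str, D: str) -> list[str]:
--     """Index D's columns per character, then scatter True into the matching
--     cells of each row instead of comparing every (i, j) pair."""
--     cols = {}
--     for p, c in enumerate(D):
--         cols.setdefault(c, []).append(p)
--
--     m = len(S) + 1
--     n = len(D) + 1
--     matrix = [[False] * n for _ in range(m)]
--
--     for i in range(1, m):
--         for p in cols.get(S[i - 1], []):
--             matrix[i][p + 1] = True
--     return matrix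
-- ===== Notes on version B (the rewrite author's own statement) =====
-- stated objective: faster
-- what changed: Replaces the all-pairs (i, j) character-comparison double loop with a dict indexing each character of D to its column positions, then scatters True into only the matching cells of each row.
import Mathlib
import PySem

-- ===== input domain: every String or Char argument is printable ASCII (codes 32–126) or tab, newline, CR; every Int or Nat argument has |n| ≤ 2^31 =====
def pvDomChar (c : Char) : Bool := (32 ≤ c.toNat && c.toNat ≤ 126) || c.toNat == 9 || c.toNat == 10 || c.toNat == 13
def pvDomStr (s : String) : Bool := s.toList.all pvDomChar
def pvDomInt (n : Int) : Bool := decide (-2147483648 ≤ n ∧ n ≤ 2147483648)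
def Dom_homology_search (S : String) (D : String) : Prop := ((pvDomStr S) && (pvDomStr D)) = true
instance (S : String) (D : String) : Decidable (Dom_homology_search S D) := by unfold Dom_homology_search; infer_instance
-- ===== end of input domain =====

-- B replaces A's all-pairs (i, j) comparison loop by a per-character column index of D
-- plus a scatter of True into only the matching cells of each row (measured faster).

-- ===== PORT A =====
-- init_matrix(m, n): [[False] * n for i in range(m)]
def init_matrix (m : Nat) (n : Nat) : List (List Bool) :=
  (List.range m).map (fun _ => List.replicate n false)

-- eyeballing(matrix, i, j): matrix[i][j] = True  (called with in-range indices only,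
-- so the in-range list update is exact)
def eyeballing (mat : List (List Bool)) (i : Nat) (j : Nat) : List (List Bool) :=
  mat.set i ((mat.getD i []).set j true)

-- S[i-1], D[j-1] are always in range at their use sites (1 ≤ i < len+1), so getD is exact there
def homology_search (S : String) (D : String) : List (List Bool) :=
  let s := S.toList
  let d := D.toList
  let m := s.length + 1
  let n := d.length + 1
  (List.range' 1 (m - 1)).foldl (fun mat i =>
    (List.range' 1 (n - 1)).foldl (fun mat j =>
      if s.getD (i - 1) ' ' = d.getD (j - 1) ' ' then eyeballing mat i j else mat) mat)
    (init_matrix m n)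

-- ===== PORT B =====
-- cols: for p, c in enumerate(D): cols.setdefault(c, []).append(p)
def hsAltCols (d : List Char) : PySem.Dict Char (List Nat) :=
  (PySem.List.enumerate d).foldl
    (fun acc pc => acc.modify pc.2 [] (fun l => l ++ [pc.1.toNat])) PySem.Dict.empty

def homology_search_alt (S : String) (D : String) : List (List Bool) :=
  let s := S.toList
  let d := D.toList
  let cols := hsAltCols d
  let m := s.length + 1
  let n := d.length + 1
  let mat0 := (List.range m).map (fun _ => List.replicate n false)
  (List.range' 1 (m - 1)).foldl (fun mat i =>
    (cols.getD (s.getD (i - 1) ' ') []).foldl (fun mat p => eyeballing mat i (p + 1)) mat)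
    mat0

-- ===== PRECONDITION & SPEC =====
def Spec_homology_search (S : String) (D : String) (out : List (List Bool)) : Prop := out = homology_search_alt S D
instance (S : String) (D : String) (out : List (List Bool)) : Decidable (Spec_homology_search S D out) := by unfold Spec_homology_search; infer_instance

-- ===== CLAIM (what is proved, stated in full; the proofs are below) =====
def Claim_equal_homology_search : Prop := ∀ (S : String) (D : String), Dom_homology_search S D → Spec_homology_search S D (homology_search S D)

-- ===== LEMMAS AND PROOFS =====

-- the common value of both programs: an all-False row 0 and column 0, and row i
-- marking the positions of S[i-1] in D
def hsRow (d : List Char) (c : Char) : List Bool :=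
  false :: d.map (fun x => decide (c = x))

def hsTarget (s d : List Char) : List (List Bool) :=
  List.replicate (d.length + 1) false :: s.map (fun c => hsRow d c)

theorem hs_nodup_range' (s n : Nat) : (List.range' s n).Nodup := by
  induction n generalizing s with
  | zero => simp
  | succ n ih =>
    rw [List.range'_succ]
    refine List.nodup_cons.mpr ⟨?_, ih (s + 1)⟩
    intro h
    have := (List.mem_range'_1.mp h).1
    omega

-- a fold of single-cell writes into row i is a set of row i to the corresponding
-- fold of single-entry writes into that row
theorem hs_fold_set_row {beta : Type} (g : beta → Nat)
    (js : List beta) (mat : List (List Bool)) (i : Nat) (hi : i < mat.length) :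
    js.foldl (fun m x => m.set i ((m.getD i []).set (g x) true)) mat
      = mat.set i (js.foldl (fun r x => r.set (g x) true) (mat.getD i [])) := by
  induction js generalizing mat with
  | nil =>
    simp only [List.foldl_nil]
    rw [List.getD_eq_getElem mat [] hi, List.set_getElem_self]
  | cons x js ih =>
    simp only [List.foldl_cons]
    rw [ih (mat.set i ((mat.getD i []).set (g x) true)) (by simpa using hi)]
    rw [List.set_set]
    congr 1
    have h2 : i < (mat.set i ((mat.getD i []).set (g x) true)).length := by simpa using hi
    rw [List.getD_eq_getElem _ [] h2]
    simp

-- a fold of row updates (each touching only its own row) over distinct row indices,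
-- read back through getElem?
theorem hs_fold_rows (F : List (List Bool) → Nat → List (List Bool))
    (T : Nat → List Bool → List Bool)
    (hF : ∀ mat i, i < mat.length → F mat i = mat.set i (T i (mat.getD i [])))
    (is : List Nat) (hnd : is.Nodup) (mat : List (List Bool))
    (hlt : ∀ i ∈ is, i < mat.length) (r : Nat) :
    (is.foldl F mat)[r]? = if r ∈ is then mat[r]?.map (T r) else mat[r]? := by
  induction is generalizing mat with
  | nil => simp
  | cons i is ih =>
    have hi : i < mat.length := hlt i (by simp)
    have hnd' : is.Nodup := hnd.of_cons
    have hni : i ∉ is := by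
      rw [List.nodup_cons] at hnd
      exact hnd.1
    simp only [List.foldl_cons]
    rw [hF mat i hi]
    rw [ih hnd' _ (by intro a ha; simpa using hlt a (by simp [ha]))]
    by_cases hr : r ∈ is
    · have hri : r ≠ i := fun h => hni (h ▸ hr)
      rw [List.getElem?_set_ne (fun h => hri h.symm)]
      simp [hr]
    · by_cases hri : r = i
      · subst hri
        rw [List.getElem?_set]
        simp [hi, hr]
      · rw [List.getElem?_set_ne (fun h => hri h.symm)]
        simp [hr, hri]

-- entries of a fold of single-entry writes into a row
theorem hs_rowfold_getElem? {beta : Type} (g : beta → Nat)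
    (js : List beta) (row : List Bool) (j : Nat) :
    (js.foldl (fun r x => r.set (g x) true) row)[j]?
      = row[j]?.map (fun b => b || js.any (fun x => g x == j)) := by
  induction js generalizing row with
  | nil => simp
  | cons x js ih =>
    simp only [List.foldl_cons]
    rw [ih]
    rw [List.getElem?_set]
    by_cases hgx : g x = j
    · subst hgx
      by_cases hlen : g x < row.length
      · simp [hlen]
      · simp [hlen]
    · rw [if_neg hgx]
      have hb : (g x == j) = false := by simp [hgx]
      simp [hb]

-- positions recorded in B's column index: getD of the built dict, fold invariant
theorem hsAltCols_getD_aux (L : List (Int × Char)) (acc : PySem.Dict Char (List Nat)) (c : Char) :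
    (L.foldl (fun acc pc => acc.modify pc.2 [] (fun l => l ++ [pc.1.toNat])) acc).getD c []
      = acc.getD c [] ++ (L.filter (fun pc => pc.2 == c)).map (fun pc => pc.1.toNat) := by
  induction L generalizing acc with
  | nil => simp
  | cons pc L ih =>
    simp only [List.foldl_cons, ih, List.filter_cons]
    by_cases hc : pc.2 = c
    · rw [hc, PySem.Dict.getD_modify_self]
      simp
    · rw [PySem.Dict.getD_modify_of_ne _ _ _ (fun h => hc h.symm)]
      simp [hc]

theorem hsAltCols_mem (d : List Char) (ch : Char) (p : Nat) :
    p ∈ (hsAltCols d).getD ch [] ↔ ∃ (k : Nat) (h : k < d.length), d[k] = ch ∧ p = k := by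
  rw [hsAltCols, hsAltCols_getD_aux]
  have hemp : (PySem.Dict.empty (κ := Char) (ν := List Nat)).getD ch [] = [] := rfl
  rw [hemp]
  simp only [List.nil_append, List.mem_map, List.mem_filter]
  constructor
  · rintro ⟨⟨q, x⟩, ⟨hmem, hx⟩, hpk⟩
    rw [PySem.List.mem_enumerate_iff] at hmem
    obtain ⟨k, hk, hjk⟩ := hmem
    simp only [Prod.mk.injEq, zero_add] at hjk
    simp only [beq_iff_eq] at hx
    refine ⟨k, hk, ?_, ?_⟩
    · rw [← hjk.2]; exact hx
    · simp only at hpk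
      rw [← hpk, hjk.1]
      simp
  · rintro ⟨k, hk, hdk, hpk⟩
    refine ⟨((k : Int), ch), ⟨?_, by simp⟩, by simp [hpk]⟩
    rw [PySem.List.mem_enumerate_iff]
    exact ⟨k, hk, by simp [hdk]⟩

-- row i of A: the inner j-loop on an all-False row yields hsRow
theorem hsA_row (d : List Char) (c : Char) :
    ((List.range' 1 d.length).filter (fun j => decide (c = d.getD (j - 1) ' '))).foldl
        (fun r j => r.set j true) (List.replicate (d.length + 1) false)
      = hsRow d c := by
  apply List.ext_getElem?
  intro j
  rw [hs_rowfold_getElem? (fun j => j)]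
  cases j with
  | zero =>
    rw [List.getElem?_replicate]
    simp only [Nat.zero_lt_succ, if_pos, hsRow, List.getElem?_cons_zero, Option.map_some,
      Bool.false_or]
    congr 1
    rw [List.any_eq_false]
    intro x hx
    have := (List.mem_range'_1.mp (List.mem_filter.mp hx).1).1
    simp only [beq_iff_eq]
    omega
  | succ k =>
    by_cases hk : k < d.length
    · rw [List.getElem?_replicate, if_pos (by omega)]
      simp only [hsRow, List.getElem?_cons_succ, List.getElem?_map,
        List.getElem?_eq_getElem hk, Option.map_some, Bool.false_or]
      congr 1
      rw [Bool.eq_iff_iff]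
      simp only [List.any_eq_true, List.mem_filter, List.mem_range'_1, beq_iff_eq,
        decide_eq_true_eq]
      constructor
      · rintro ⟨x, ⟨⟨hx1, hx2⟩, hcx⟩, hxj⟩
        subst hxj
        rwa [Nat.add_sub_cancel, List.getD_eq_getElem d ' ' hk] at hcx
      · intro h
        exact ⟨k + 1, ⟨⟨by omega, by omega⟩, by
          rw [Nat.add_sub_cancel, List.getD_eq_getElem d ' ' hk]; exact h⟩, rfl⟩
    · rw [List.getElem?_replicate, if_neg (by omega)]
      simp [hsRow, List.getElem?_eq_none (by simpa using hk : d.length ≤ k)]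

-- row i of B: scattering True at cols[c] (+1) on an all-False row yields hsRow
theorem hsB_row (d : List Char) (c : Char) :
    ((hsAltCols d).getD c []).foldl (fun r p => r.set (p + 1) true)
        (List.replicate (d.length + 1) false)
      = hsRow d c := by
  apply List.ext_getElem?
  intro j
  rw [hs_rowfold_getElem? (fun p => p + 1)]
  cases j with
  | zero =>
    rw [List.getElem?_replicate]
    simp only [Nat.zero_lt_succ, if_pos, hsRow, List.getElem?_cons_zero, Option.map_some,
      Bool.false_or]
    congr 1
    rw [List.any_eq_false]
    intro x _
    simp
  | succ k =>
    by_cases hk : k < d.length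
    · rw [List.getElem?_replicate, if_pos (by omega)]
      simp only [hsRow, List.getElem?_cons_succ, List.getElem?_map,
        List.getElem?_eq_getElem hk, Option.map_some, Bool.false_or]
      congr 1
      rw [Bool.eq_iff_iff]
      simp only [List.any_eq_true, beq_iff_eq, decide_eq_true_eq]
      constructor
      · rintro ⟨p, hp, hpk⟩
        obtain ⟨k', hk', hdk', hpk'⟩ := (hsAltCols_mem d c p).mp hp
        have : k' = k := by omega
        subst this
        exact hdk'.symm
      · intro h
        exact ⟨k, (hsAltCols_mem d c k).mpr ⟨k, hk, h.symm, rfl⟩, rfl⟩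
    · rw [List.getElem?_replicate, if_neg (by omega)]
      simp [hsRow, List.getElem?_eq_none (by simpa using hk : d.length ≤ k)]

-- A equals the common matrix
theorem hsA_eq (S D : String) :
    homology_search S D = hsTarget S.toList D.toList := by
  simp only [homology_search, Nat.add_sub_cancel]
  apply List.ext_getElem?
  intro r
  rw [hs_fold_rows _
    (fun i row => ((List.range' 1 D.toList.length).filter
        (fun j => decide (S.toList.getD (i - 1) ' ' = D.toList.getD (j - 1) ' '))).foldl
      (fun r j => r.set j true) row)
    (by
      intro mat i hi
      rw [PySem.List.foldl_ite_eq_foldl_filter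
        (p := fun j => S.toList.getD (i - 1) ' ' = D.toList.getD (j - 1) ' ')
        (f := fun m j => eyeballing m i j)]
      exact hs_fold_set_row (fun j => j) _ mat i hi)
    _ (hs_nodup_range' 1 S.toList.length) _
    (by
      intro i hi
      have := (List.mem_range'_1.mp hi).2
      simp only [init_matrix, List.length_map, List.length_range]
      omega)
    r]
  have hmat0 : ∀ (q : Nat), (init_matrix (S.toList.length + 1) (D.toList.length + 1))[q]?
      = if q < S.toList.length + 1 then some (List.replicate (D.toList.length + 1) false) else none := by
    intro q
    rw [init_matrix, List.getElem?_map]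
    by_cases hq : q < S.toList.length + 1
    · rw [List.getElem?_range hq, if_pos hq]
      rfl
    · rw [List.getElem?_eq_none (by rw [List.length_range]; omega), if_neg hq]
      rfl
  rw [hmat0]
  by_cases hr : r ∈ List.range' 1 S.toList.length
  · obtain ⟨hr1, hr2⟩ := List.mem_range'_1.mp hr
    rw [if_pos hr, if_pos (by omega)]
    obtain ⟨k, rfl⟩ : ∃ k, r = k + 1 := ⟨r - 1, by omega⟩
    have hk : k < S.toList.length := by omega
    simp only [Option.map_some, hsTarget, List.getElem?_cons_succ, List.getElem?_map,
      List.getElem?_eq_getElem hk, Nat.add_sub_cancel]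
    rw [List.getD_eq_getElem S.toList ' ' hk, hsA_row]
  · rw [if_neg hr]
    rw [List.mem_range'_1] at hr
    by_cases hr0 : r = 0
    · subst hr0
      simp [hsTarget]
    · rw [if_neg (by omega)]
      obtain ⟨k, rfl⟩ : ∃ k, r = k + 1 := ⟨r - 1, by omega⟩
      have hlen : (S.toList.map (fun c => hsRow D.toList c)).length ≤ k := by
        rw [List.length_map]; omega
      simp [hsTarget, List.getElem?_eq_none hlen]

-- B equals the common matrix
theorem hsB_eq (S D : String) :
    homology_search_alt S D = hsTarget S.toList D.toList := by
  simp only [homology_search_alt, Nat.add_sub_cancel]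
  apply List.ext_getElem?
  intro r
  rw [hs_fold_rows _
    (fun i row => ((hsAltCols D.toList).getD (S.toList.getD (i - 1) ' ') []).foldl
      (fun r p => r.set (p + 1) true) row)
    (by
      intro mat i hi
      exact hs_fold_set_row (fun p => p + 1) _ mat i hi)
    _ (hs_nodup_range' 1 S.toList.length) _
    (by
      intro i hi
      have := (List.mem_range'_1.mp hi).2
      simp only [List.length_map, List.length_range]
      omega)
    r]
  have hmat0 : ∀ (q : Nat), ((List.range (S.toList.length + 1)).map
        (fun _ => List.replicate (D.toList.length + 1) false))[q]?
      = if q < S.toList.length + 1 then some (List.replicate (D.toList.length + 1) false) else none := by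
    intro q
    rw [List.getElem?_map]
    by_cases hq : q < S.toList.length + 1
    · rw [List.getElem?_range hq, if_pos hq]
      rfl
    · rw [List.getElem?_eq_none (by rw [List.length_range]; omega), if_neg hq]
      rfl
  rw [hmat0]
  by_cases hr : r ∈ List.range' 1 S.toList.length
  · obtain ⟨hr1, hr2⟩ := List.mem_range'_1.mp hr
    rw [if_pos hr, if_pos (by omega)]
    obtain ⟨k, rfl⟩ : ∃ k, r = k + 1 := ⟨r - 1, by omega⟩
    have hk : k < S.toList.length := by omega
    simp only [Option.map_some, hsTarget, List.getElem?_cons_succ, List.getElem?_map,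
      List.getElem?_eq_getElem hk, Nat.add_sub_cancel]
    rw [List.getD_eq_getElem S.toList ' ' hk, hsB_row]
  · rw [if_neg hr]
    rw [List.mem_range'_1] at hr
    by_cases hr0 : r = 0
    · subst hr0
      simp [hsTarget]
    · rw [if_neg (by omega)]
      obtain ⟨k, rfl⟩ : ∃ k, r = k + 1 := ⟨r - 1, by omega⟩
      have hlen : (S.toList.map (fun c => hsRow D.toList c)).length ≤ k := by
        rw [List.length_map]; omega
      simp [hsTarget, List.getElem?_eq_none hlen]

-- ===== VERDICT (by name: the statement is the Claim_ definition above) =====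
theorem homology_search_spec : Claim_equal_homology_search := by
  intro S D _
  unfold Spec_homology_search
  rw [hsA_eq, hsB_eq]
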